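-- pv_equiv track=rewrite | github.com/boostcampaitech4lv23nlp1/final-project-level3-nlp-01 | STT/data/utils/delete_loop.py | delete_loop
-- ===== SOURCE A (Python) =====
-- from itertools import combinations
--
-- def delete_loop(text):
--     new_text = text[:]
--     tmp = text.split()
--     arr = [i for i in range(len(tmp)+1)]
--     can_list = [com for com in combinations(arr, 2) if com[1] - com[0] + 1 <= len(arr)-com[1]]
--     for can in can_list:
--         string = tmp[can[0]:can[1]]
--         stick = can[1]
--         len_string = len(string)
--         cnt = 0
--         for i in range((len(arr) - can[1]) // (can[1] - can[0])):
--             end_stick = stick + len_string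
--             if string != tmp[stick:end_stick]:
--                 continue
--             cnt += 1
--             stick = end_stick
--         if cnt != 0:
--             new_tmp = tmp[:can[1]] + tmp[can[1] + len_string*cnt:]
--             new_text = ' '.join(new_tmp)
--             break
--     if text == new_text:
--         return text
--     else:
--         return delete_loop(new_text)
-- ===== SOURCE B (Python) =====
-- def delete_loop(text):
--     # Iterative fixpoint loop; candidates (i, L) enumerated directly, repeat count
--     # found by an elementwise periodicity scan words[p] == words[p - L].
--     while True:
--         words = text.split()
--         n = len(words)
--         new_text = text
--         found = False
--         for i in range(n):
--             L = 1
--             while i + 2 * L <= n: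
--                 j = i + L
--                 p = j
--                 while p < n and words[p] == words[p - L]:
--                     p += 1
--                 cnt = (p - j) // L
--                 if cnt:
--                     new_text = ' '.join(words[:j] + words[j + L * cnt:])
--                     found = True
--                     break
--                 L += 1
--             if found:
--                 break
--         if text == new_text:
--             return text
--         text = new_text
-- ===== Notes on version B (the rewrite author's own statement) =====
-- stated objective: alternative
-- what changed: Replaces A's tail recursion by an iterative fixpoint loop, drops the materialised combinations candidate list in favour of directly nested (start, period) loops, and replaces A's repeated slice-comparison counting (which re-compares a frozen slice after the first mismatch) by a single elementwise periodicity scan words[p] == words[p-L] whose run length is divided by the period.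
import Mathlib
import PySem

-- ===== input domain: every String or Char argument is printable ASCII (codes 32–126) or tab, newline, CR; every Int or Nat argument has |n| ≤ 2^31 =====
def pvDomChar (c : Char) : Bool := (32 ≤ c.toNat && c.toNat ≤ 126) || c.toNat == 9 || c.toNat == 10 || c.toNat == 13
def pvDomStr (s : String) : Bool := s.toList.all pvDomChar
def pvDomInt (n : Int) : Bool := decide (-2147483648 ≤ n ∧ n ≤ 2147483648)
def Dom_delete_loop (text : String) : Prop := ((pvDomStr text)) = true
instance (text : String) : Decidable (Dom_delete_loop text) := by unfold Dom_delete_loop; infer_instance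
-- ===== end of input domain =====

-- B replaces A's tail recursion by an iterative fixpoint loop, enumerates candidates
-- with nested (start, period) loops instead of a materialised combinations list, and
-- counts repeats by an elementwise periodicity scan instead of repeated slice compares.


-- ===== PORT A =====
-- itertools.combinations(l, 2) in l's order
def pyComb2 {α : Type} : List α → List (α × α)
  | [] => []
  | x :: xs => (xs.map fun y => (x, y)) ++ pyComb2 xs

-- one iteration of A's inner `for i in range(...)` loop body (state = (stick, cnt))
def stepA (tmp string : List String) (len_string : Nat) (st : Nat × Nat) : Nat × Nat :=
  let end_stick := st.1 + len_string
  if string ≠ PySem.List.slice tmp (some (st.1 : Int)) (some (end_stick : Int)) then st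
  else (end_stick, st.2 + 1)

-- A's `for can in can_list` loop: first candidate with cnt != 0 collapses (break)
def findCollapseA (tmp : List String) (n : Nat) : List (Nat × Nat) → Option (List String)
  | [] => none
  | c :: rest =>
      let string := PySem.List.slice tmp (some (c.1 : Int)) (some (c.2 : Int))
      let len_string := string.length
      let st := (List.range ((n + 1 - c.2) / (c.2 - c.1))).foldl
          (fun st _ => stepA tmp string len_string st) (c.2, 0)
      if st.2 ≠ 0 then
        some (PySem.List.slice tmp none (some (c.2 : Int)) ++
              PySem.List.slice tmp (some ((c.2 + len_string * st.2 : Nat) : Int)) none)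
      else findCollapseA tmp n rest

-- A's recursion `return delete_loop(new_text)`, made total by fuel (word count strictly
-- decreases on every recursive call, and the top-level fuel is word count + 1)
def dlGoA : Nat → String → String
  | 0, text => text
  | f + 1, text =>
      let tmp := PySem.Str.split₀ text
      let n := tmp.length
      let arr := List.range (n + 1)
      let can_list := (pyComb2 arr).filter fun c => decide (c.2 - c.1 + 1 ≤ n + 1 - c.2)
      let new_text := match findCollapseA tmp n can_list with
        | none => text
        | some new_tmp => PySem.Str.join " " new_tmp
      if text = new_text then text else dlGoA f new_text

def delete_loop (text : String) : String := dlGoA ((PySem.Str.split₀ text).length + 1) text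

-- ===== PORT B =====
-- B's innermost `while p < n and words[p] == words[p - L]` scan, fuel = n - p at entry
def scanB (w : List String) (n L : Nat) : Nat → Nat → Nat
  | 0, p => p
  | f + 1, p =>
      if p < n ∧ w.getD p "" = w.getD (p - L) "" then scanB w n L f (p + 1) else p

-- B's `while i + 2 * L <= n` loop over the period L (break on first collapse)
def innerB (w : List String) (n i : Nat) (L : Nat) : Option (List String) :=
  if h : i + 2 * L ≤ n then
    let j := i + L
    let p := scanB w n L (n - j) j
    let cnt := (p - j) / L
    if cnt ≠ 0 then some (w.take j ++ w.drop (j + L * cnt))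
    else innerB w n i (L + 1)
  else none
  termination_by n + 1 - 2 * L
  decreasing_by omega

-- B's `for i in range(n)` loop (break on first collapse)
def outerB (w : List String) (n : Nat) (i : Nat) : Option (List String) :=
  if i < n then
    match innerB w n i 1 with
    | some r => some r
    | none => outerB w n (i + 1)
  else none
  termination_by n - i

-- B's `while True` fixpoint loop, fuel as in port A
def dlGoB : Nat → String → String
  | 0, text => text
  | f + 1, text =>
      let w := PySem.Str.split₀ text
      let n := w.length
      let new_text := match outerB w n 0 with
        | none => text
        | some nw => PySem.Str.join " " nw
      if text = new_text then text else dlGoB f new_text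

def delete_loop_alt (text : String) : String := dlGoB ((PySem.Str.split₀ text).length + 1) text

-- ===== PRECONDITION & SPEC =====
def Spec_delete_loop (text : String) (out : String) : Prop := out = delete_loop_alt text
instance (text : String) (out : String) : Decidable (Spec_delete_loop text out) := by unfold Spec_delete_loop; infer_instance

-- ===== CLAIM (what is proved, stated in full; the proofs are below) =====
def Claim_equal_delete_loop : Prop := ∀ (text : String), Dom_delete_loop text → Spec_delete_loop text (delete_loop text)

-- ===== LEMMAS AND PROOFS =====

-- leading-true count of predicate P from q, bounded by fuel (proof-side only)
def leadR (P : Nat → Prop) [DecidablePred P] : Nat → Nat → Nat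
  | 0, _ => 0
  | f + 1, q => if P q then leadR P f (q + 1) + 1 else 0

theorem leadR_spec1 (P : Nat → Prop) [DecidablePred P] :
    ∀ f q t, t < leadR P f q → P (q + t) := by
  intro f
  induction f with
  | zero => intro q t h; simp [leadR] at h
  | succ f ih =>
      intro q t h
      by_cases hp : P q
      · simp only [leadR, if_pos hp] at h
        cases t with
        | zero => simpa using hp
        | succ t =>
            have := ih (q + 1) t (by omega)
            simpa [Nat.add_assoc, Nat.add_comm 1 t] using this
      · simp [leadR, if_neg hp] at h

theorem leadR_spec2 (P : Nat → Prop) [DecidablePred P] :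
    ∀ f q, leadR P f q < f → ¬ P (q + leadR P f q) := by
  intro f
  induction f with
  | zero => intro q h; omega
  | succ f ih =>
      intro q h
      by_cases hp : P q
      · simp only [leadR, if_pos hp] at h ⊢
        have := ih (q + 1) (by omega)
        simpa [Nat.add_assoc, Nat.add_comm 1 (leadR P f (q+1))] using this
      · simpa [leadR, if_neg hp] using hp

theorem leadR_le (P : Nat → Prop) [DecidablePred P] : ∀ f q, leadR P f q ≤ f := by
  intro f
  induction f with
  | zero => intro q; simp [leadR]
  | succ f ih =>
      intro q
      by_cases hp : P q
      · simp only [leadR, if_pos hp]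
        exact Nat.succ_le_succ (ih _)
      · simp [leadR, if_neg hp]

-- foldl of a constant-step function over List.range is Function.iterate
theorem foldl_range_const {σ : Type} (g : σ → σ) (m : Nat) (s : σ) :
    (List.range m).foldl (fun s _ => g s) s = g^[m] s := by
  induction m generalizing s with
  | zero => simp
  | succ m ih =>
      rw [List.range_succ, List.foldl_append]
      simp [ih, Function.iterate_succ_apply']

-- ----- scan characterisation -----
theorem scan_ge (w : List String) (n L : Nat) : ∀ f p, p ≤ scanB w n L f p := by
  intro f
  induction f with
  | zero => intro p; simp [scanB]
  | succ f ih =>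
      intro p
      simp only [scanB]
      split
      · exact le_trans (Nat.le_succ p) (ih (p + 1))
      · exact le_refl p

theorem scan_mid (w : List String) (n L : Nat) :
    ∀ f p s, p ≤ s → s < scanB w n L f p →
      s < n ∧ w.getD s "" = w.getD (s - L) "" := by
  intro f
  induction f with
  | zero => intro p s h1 h2; simp [scanB] at h2; omega
  | succ f ih =>
      intro p s h1 h2
      simp only [scanB] at h2
      split at h2
      · rcases Nat.eq_or_lt_of_le h1 with rfl | hlt
        · assumption
        · exact ih (p + 1) s hlt h2
      · omega

theorem scan_pass (w : List String) (n L : Nat) :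
    ∀ f p q, p ≤ q → q ≤ p + f →
      (∀ s, p ≤ s → s < q → s < n ∧ w.getD s "" = w.getD (s - L) "") →
      q ≤ scanB w n L f p := by
  intro f
  induction f with
  | zero => intro p q h1 h2 _; simp [scanB]; omega
  | succ f ih =>
      intro p q h1 h2 hall
      rcases Nat.eq_or_lt_of_le h1 with rfl | hlt
      · exact scan_ge w n L _ p
      · have hE := hall p (le_refl p) hlt
        simp only [scanB, if_pos hE]
        exact ih (p + 1) q hlt (by omega) (fun s hs1 hs2 => hall s (by omega) hs2)

theorem scan_le_n (w : List String) (n L : Nat) :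
    ∀ f p, p ≤ n → scanB w n L f p ≤ n := by
  intro f
  induction f with
  | zero => intro p h; simpa [scanB]
  | succ f ih =>
      intro p h
      simp only [scanB]
      split
      · next hc => exact ih (p + 1) hc.1
      · exact h

-- ----- per-candidate equality: A's slice-compare fold counts what B's scan counts -----

-- the block-match predicate for candidate (i, i+L) over word list w
abbrev MatchB (w : List String) (i L q : Nat) : Prop :=
  List.take L (List.drop i w) = List.take L (List.drop (i + L + q * L) w)

theorem stepA_match (w : List String) (i L q c : Nat) (hq : MatchB w i L q) :
    stepA w (List.take L (List.drop i w)) L (i + L + q * L, c) = (i + L + (q + 1) * L, c + 1) := by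
  have hx : PySem.List.slice w (some ((i + L + q * L : Nat) : Int))
      (some ((i + L + q * L + L : Nat) : Int)) = List.take L (List.drop (i + L + q * L) w) := by
    rw [PySem.List.slice_natCast]
    congr 1
    omega
  unfold MatchB at hq
  simp only [stepA, hx, if_neg (not_not_intro hq)]
  have he : i + L + q * L + L = i + L + (q + 1) * L := by ring
  rw [he]

theorem stepA_nomatch (w : List String) (i L q c : Nat) (hq : ¬ MatchB w i L q) :
    stepA w (List.take L (List.drop i w)) L (i + L + q * L, c) = (i + L + q * L, c) := by
  have hx : PySem.List.slice w (some ((i + L + q * L : Nat) : Int))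
      (some ((i + L + q * L + L : Nat) : Int)) = List.take L (List.drop (i + L + q * L) w) := by
    rw [PySem.List.slice_natCast]
    congr 1
    omega
  unfold MatchB at hq
  simp only [stepA, hx, if_pos hq]

theorem iterA (w : List String) (i L : Nat) :
    ∀ f q c, ((fun st => stepA w (List.take L (List.drop i w)) L st)^[f] (i + L + q * L, c)).2
      = c + leadR (MatchB w i L) f q := by
  intro f
  induction f with
  | zero => intro q c; simp [leadR]
  | succ f ih =>
      intro q c
      rw [Function.iterate_succ_apply]
      by_cases hq : MatchB w i L q
      · rw [stepA_match w i L q c hq, ih (q + 1) (c + 1)]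
        simp [leadR, if_pos hq]
        omega
      · have hfix := Function.iterate_fixed
          (f := fun st => stepA w (List.take L (List.drop i w)) L st)
          (x := (i + L + q * L, c)) (stepA_nomatch w i L q c hq) f
        rw [stepA_nomatch w i L q c hq, hfix]
        simp [leadR, if_neg hq]

theorem matchB_len (w : List String) (i L q : Nat) (hL : 1 ≤ L) (hiL : i + L ≤ w.length)
    (hq : MatchB w i L q) : i + L + q * L + L ≤ w.length := by
  have := congrArg List.length hq
  simp only [List.length_take, List.length_drop] at this
  omega

theorem matchB_elem (w : List String) (i L q : Nat) (hq : MatchB w i L q) (t : Nat) (ht : t < L) :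
    w[i + L + q * L + t]? = w[i + t]? := by
  have := congrArg (fun l => l[t]?) hq
  simp only [List.getElem?_take, if_pos ht, List.getElem?_drop] at this
  exact this.symm

theorem run_all (w : List String) (i L : Nat) (hL : 1 ≤ L) (hcan : i + 2 * L ≤ w.length)
    (r : Nat) (hmat : ∀ q < r, MatchB w i L q) :
    ∀ s, s < r * L → i + L + s < w.length ∧ w.getD (i + L + s) "" = w.getD (i + L + s - L) "" := by
  intro s hs
  have hL0 : 0 < L := hL
  obtain ⟨q, t, htL, hqt, hqr⟩ : ∃ q t, t < L ∧ L * q + t = s ∧ q < r :=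
    ⟨s / L, s % L, Nat.mod_lt _ hL0, Nat.div_add_mod s L,
      (Nat.div_lt_iff_lt_mul hL0).2 hs⟩
  have hcomm : L * q = q * L := Nat.mul_comm L q
  have hm := hmat q hqr
  have hlen := matchB_len w i L q hL (by omega) hm
  have helem := matchB_elem w i L q hm t htL
  have hidx1 : i + L + s = i + L + q * L + t := by omega
  refine ⟨by omega, ?_⟩
  have e1 : w[i + L + s]? = w[i + t]? := by rw [hidx1]; exact helem
  have e2 : w[i + L + s - L]? = w[i + t]? := by
    rcases Nat.eq_zero_or_pos q with h0 | hqpos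
    · subst h0
      have : i + L + s - L = i + t := by omega
      rw [this]
    · obtain ⟨q', rfl⟩ := Nat.exists_eq_succ_of_ne_zero (by omega : q ≠ 0)
      have hcomm' : L * q' = q' * L := Nat.mul_comm L q'
      have hqt2 : q' * L + L + t = s := by
        rw [Nat.succ_eq_add_one] at hqt
        have e : L * (q' + 1) = q' * L + L := by ring
        omega
      have : i + L + s - L = i + L + q' * L + t := by omega
      rw [this]
      exact matchB_elem w i L q' (hmat q' (by omega)) t htL
  simp only [List.getD_eq_getElem?_getD, e1, e2]

theorem cand_eq (w : List String) (i L : Nat) (hL : 1 ≤ L) (hcan : i + 2 * L ≤ w.length) :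
    ((List.range ((w.length + 1 - (i + L)) / L)).foldl
        (fun st _ => stepA w (List.take L (List.drop i w)) L st) (i + L, 0)).2
      = (scanB w w.length L (w.length - (i + L)) (i + L) - (i + L)) / L := by
  have hL0 : 0 < L := hL
  set n := w.length with hn
  set m := (n + 1 - (i + L)) / L with hm
  have hfold : ((List.range m).foldl
      (fun st _ => stepA w (List.take L (List.drop i w)) L st) (i + L, 0)).2
      = leadR (MatchB w i L) m 0 := by
    rw [foldl_range_const]
    have h := iterA w i L m 0 0
    simpa using h
  set r := leadR (MatchB w i L) m 0 with hr
  have hrle : r ≤ m := leadR_le _ m 0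
  have hmat : ∀ q < r, MatchB w i L q := by
    intro q hq
    simpa using leadR_spec1 (MatchB w i L) m 0 q (by omega)
  set Q := scanB w n L (n - (i + L)) (i + L) with hQ
  have hQge : i + L ≤ Q := scan_ge w n L _ _
  have hQn : Q ≤ n := scan_le_n w n L _ _ (by omega)
  have hrL : r * L + L = (r + 1) * L := by ring
  have hrn : i + L + r * L ≤ n := by
    rcases Nat.eq_zero_or_pos r with h0 | hpos
    · rw [h0]; simp; omega
    · have h1 := matchB_len w i L (r - 1) hL (by omega) (hmat (r - 1) (by omega))
      have h3 : r * L = (r - 1) * L + L := by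
        have h2 : r = (r - 1) + 1 := by omega
        calc r * L = ((r - 1) + 1) * L := by rw [← h2]
          _ = (r - 1) * L + L := by ring
      omega
  have hG1 : i + L + r * L ≤ Q := by
    rw [hQ]
    apply scan_pass w n L (n - (i + L)) (i + L) (i + L + r * L) (by omega) (by omega)
    intro s hs1 hs2
    have hr' := run_all w i L hL hcan r hmat (s - (i + L)) (by omega)
    have hidx : i + L + (s - (i + L)) = s := by omega
    rw [hidx] at hr'
    exact hr'
  have hG2 : Q < i + L + (r + 1) * L := by
    by_cases hcase : r = m
    · have h2 : (n + 1 - (i + L)) % L < L := Nat.mod_lt _ hL0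
      have h1 : L * m + (n + 1 - (i + L)) % L = n + 1 - (i + L) := by
        rw [hm]; exact Nat.div_add_mod _ _
      have h3 : (m + 1) * L = L * m + L := by ring
      have h4 : (r + 1) * L = (m + 1) * L := by rw [hcase]
      omega
    · have hrm : r < m := by omega
      have hnm : ¬ MatchB w i L r := by
        have := leadR_spec2 (MatchB w i L) m 0 (by omega)
        simpa [← hr] using this
      by_cases hfit : i + L + r * L + L ≤ n
      · obtain ⟨t0, hne0⟩ : ∃ t0,
            (List.take L (List.drop i w))[t0]? ≠ (List.take L (List.drop (i + L + r * L) w))[t0]? := by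
          by_contra hco
          apply hnm
          apply List.ext_getElem?
          intro t
          by_contra hne
          exact hco ⟨t, hne⟩
        have ht0L : t0 < L := by
          rcases Nat.lt_or_ge t0 L with h | h
          · exact h
          · exfalso
            apply hne0
            rw [List.getElem?_take, List.getElem?_take, if_neg (by omega), if_neg (by omega)]
        have hE1 : w[i + t0]? ≠ w[i + L + r * L + t0]? := by
          simpa only [List.getElem?_take, if_pos ht0L, List.getElem?_drop] using hne0
        have chainK : ∀ s, s < Q → i + L ≤ s → w[s]? = w[i + (s - (i + L)) % L]? := by
          intro s
          induction s using Nat.strong_induction_on with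
          | _ s ih =>
            intro hsQ hsge
            have hE := scan_mid w n L (n - (i + L)) (i + L) s hsge (by rw [← hQ]; exact hsQ)
            have hsn : s < n := hE.1
            have hptr : w[s]? = w[s - L]? := by
              have hgd := hE.2
              rw [List.getD_eq_getElem?_getD, List.getD_eq_getElem?_getD,
                List.getElem?_eq_getElem (by omega : s < w.length),
                List.getElem?_eq_getElem (by omega : s - L < w.length)] at hgd
              simp only [Option.getD_some] at hgd
              rw [List.getElem?_eq_getElem (by omega : s < w.length),
                List.getElem?_eq_getElem (by omega : s - L < w.length), hgd]
            by_cases hsmall : s - (i + L) < L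
            · have hix : s - L = i + (s - (i + L)) := by omega
              rw [Nat.mod_eq_of_lt hsmall, hptr, hix]
            · have hIH := ih (s - L) (by omega) (by omega) (by omega)
              rw [hptr, hIH]
              congr 2
              have hx : s - (i + L) = (s - L - (i + L)) + L := by omega
              rw [hx, Nat.add_mod_right]
        rcases Nat.lt_or_ge Q (i + L + (r + 1) * L) with hok | hcon
        · exact hok
        exfalso
        have hsQ : i + L + r * L + t0 < Q := by omega
        have hch := chainK (i + L + r * L + t0) hsQ (by omega)
        have hmod : (i + L + r * L + t0 - (i + L)) % L = t0 := by
          have hcm : L * r = r * L := Nat.mul_comm L r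
          have hx : i + L + r * L + t0 - (i + L) = L * r + t0 := by omega
          rw [hx, Nat.mul_add_mod, Nat.mod_eq_of_lt ht0L]
        rw [hmod] at hch
        exact hE1 hch.symm
        
      · omega
  rw [hfold]
  symm
  exact Nat.div_eq_of_lt_le (by omega) (by omega)

-- A's candidate head computation agrees with B's inner-loop body on candidate (i, i+L)
theorem findA_cons (w : List String) (i L : Nat) (hL : 1 ≤ L) (hcan : i + 2 * L ≤ w.length)
    (rest : List (Nat × Nat)) :
    findCollapseA w w.length ((i, i + L) :: rest) =
      (let j := i + L
       let p := scanB w w.length L (w.length - j) j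
       let cnt := (p - j) / L
       if cnt ≠ 0 then some (w.take j ++ w.drop (j + L * cnt))
       else findCollapseA w w.length rest) := by
  have hminL : min L (w.length - i) = L := by omega
  simp only [findCollapseA, PySem.List.slice_natCast, PySem.List.slice_to_natCast,
    PySem.List.slice_from_natCast, Nat.add_sub_cancel_left, List.length_take,
    List.length_drop, hminL]
  rw [cand_eq w i L hL hcan]

theorem findA_append (tmp : List String) (n : Nat) (xs ys : List (Nat × Nat)) :
    findCollapseA tmp n (xs ++ ys) =
      match findCollapseA tmp n xs with
      | some r => some r
      | none => findCollapseA tmp n ys := by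
  induction xs with
  | nil => simp [findCollapseA]
  | cons c rest ih =>
      simp only [List.cons_append, findCollapseA]
      split
      · rfl
      · exact ih

theorem filter_none (w : List String) (i L : Nat) (hno : ¬ i + 2 * L ≤ w.length) :
    ((List.range' (i + L) (w.length + 1 - (i + L))).map (fun y => (i, y))).filter
        (fun c => decide (c.2 - c.1 + 1 ≤ w.length + 1 - c.2)) = [] := by
  rw [List.filter_eq_nil_iff]
  intro c hc
  simp only [List.mem_map, List.mem_range'] at hc
  obtain ⟨y, ⟨hy1, hy2⟩, rfl⟩ := hc
  simp only [decide_eq_true_eq]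
  omega

theorem inner_eq (w : List String) (i : Nat) :
    ∀ K L, 1 ≤ L → w.length + 1 - 2 * L ≤ K →
      findCollapseA w w.length
          (((List.range' (i + L) (w.length + 1 - (i + L))).map fun y => (i, y)).filter
            fun c => decide (c.2 - c.1 + 1 ≤ w.length + 1 - c.2))
        = innerB w w.length i L := by
  intro K
  induction K with
  | zero =>
      intro L hL hK
      have hno : ¬ i + 2 * L ≤ w.length := by omega
      rw [filter_none w i L hno, innerB, dif_neg hno]
      rfl
  | succ K ih =>
      intro L hL hK
      by_cases hcan : i + 2 * L ≤ w.length
      · have hlen : w.length + 1 - (i + L) = (w.length - (i + L)) + 1 := by omega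
        rw [hlen, List.range'_succ]
        simp only [List.map_cons, List.filter_cons]
        have hpred : (i + L) - i + 1 ≤ w.length + 1 - (i + L) := by omega
        simp only [decide_eq_true_eq]
        rw [if_pos hpred]
        have htail : List.range' (i + L + 1) (w.length - (i + L))
            = List.range' (i + (L + 1)) (w.length + 1 - (i + (L + 1))) := by
          congr 1
          omega
        rw [htail, findA_cons w i L hL hcan]
        rw [ih (L + 1) (by omega) (by omega)]
        conv_rhs => rw [innerB]
        rw [dif_pos hcan]
      · rw [filter_none w i L hcan, innerB, dif_neg hcan]
        rfl

theorem outer_eq (w : List String) :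
    ∀ K i, w.length - i ≤ K →
      findCollapseA w w.length
          ((pyComb2 (List.range' i (w.length + 1 - i))).filter
            fun c => decide (c.2 - c.1 + 1 ≤ w.length + 1 - c.2))
        = outerB w w.length i := by
  intro K
  induction K with
  | zero =>
      intro i hK
      have hni : ¬ i < w.length := by omega
      rw [outerB, if_neg hni]
      have h01 : w.length + 1 - i = 0 ∨ w.length + 1 - i = 1 := by omega
      rcases h01 with h | h <;> rw [h] <;> simp [pyComb2, findCollapseA]
  | succ K ih =>
      intro i hK
      by_cases hi : i < w.length
      · have hlen : w.length + 1 - i = (w.length - i) + 1 := by omega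
        rw [hlen, List.range'_succ]
        simp only [pyComb2, List.filter_append]
        rw [findA_append]
        have hfst : findCollapseA w w.length
            (((List.range' (i + 1) (w.length - i)).map fun y => (i, y)).filter
              fun c => decide (c.2 - c.1 + 1 ≤ w.length + 1 - c.2))
            = innerB w w.length i 1 := by
          have hx : List.range' (i + 1) (w.length - i)
              = List.range' (i + 1) (w.length + 1 - (i + 1)) := by
            congr 1
            omega
          rw [hx]
          exact inner_eq w i (w.length + 1 - 2) 1 (by omega) (by omega)
        have hsnd : findCollapseA w w.length
            ((pyComb2 (List.range' (i + 1) (w.length - i))).filter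
              fun c => decide (c.2 - c.1 + 1 ≤ w.length + 1 - c.2))
            = outerB w w.length (i + 1) := by
          have hx : List.range' (i + 1) (w.length - i)
              = List.range' (i + 1) (w.length + 1 - (i + 1)) := by
            congr 1
            omega
          rw [hx]
          exact ih (i + 1) (by omega)
        rw [hfst, hsnd]
        conv_rhs => rw [outerB]
        rw [if_pos hi]
      · have hni := hi
        rw [outerB, if_neg hni]
        have h01 : w.length + 1 - i = 0 ∨ w.length + 1 - i = 1 := by omega
        rcases h01 with h | h <;> rw [h] <;> simp [pyComb2, findCollapseA]

theorem step_eq (tmp : List String) :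
    findCollapseA tmp tmp.length
        ((pyComb2 (List.range (tmp.length + 1))).filter
          fun c => decide (c.2 - c.1 + 1 ≤ tmp.length + 1 - c.2))
      = outerB tmp tmp.length 0 := by
  have := outer_eq tmp tmp.length 0 (by omega)
  simpa [List.range_eq_range'] using this

theorem dlGo_eq : ∀ f text, dlGoA f text = dlGoB f text := by
  intro f
  induction f with
  | zero => intro text; rfl
  | succ f ih =>
      intro text
      simp only [dlGoA, dlGoB, step_eq]
      split <;> split <;> simp [ih]

-- ===== VERDICT (by name: the statement is the Claim_ definition above) =====
theorem delete_loop_spec : Claim_equal_delete_loop := by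
  intro text _
  unfold Spec_delete_loop delete_loop delete_loop_alt
  exact dlGo_eq _ text
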